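-- pv_equiv track=rewrite | github.com/Nagavenkatasai7/assistant | src/utils/resume_validator.py | _count_bullets
-- ===== SOURCE A (Python) =====
-- def _count_bullets(text: str) -> int:
--     """Count all bullet points in experience/projects/publications sections"""
--     # Match lines starting with "- " (markdown bullet)
--     # Exclude education bullets and personal section
--     lines = text.split('\n')
--
--     in_experience_section = False
--     bullet_count = 0
--
--     for line in lines:
--         line_lower = line.lower().strip()
--
--         # Start counting after education, in experience/projects/publications
--         if any(marker in line_lower for marker in ['## professional experience', '## research', '## projects', '## publications', '## research & professional']):
--             in_experience_section = True
--             continue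
--
--         # Stop counting at personal section or additional sections
--         if '## what drives me' in line_lower or '## additional' in line_lower:
--             in_experience_section = False
--             continue
--
--         # Count bullets in experience sections
--         if in_experience_section and line.strip().startswith('- '):
--             bullet_count += 1
--
--     return bullet_count
-- ===== SOURCE B (Python) =====
-- # Segment-based re-implementation: classify each line as start/stop/plain marker,
-- # split the text into marker-delimited segments tagged by their opening marker,
-- # then count bullets in the segments tagged as counting.
--
-- _STARTS = ['## professional experience', '## research', '## projects',
--            '## publications', '## research & professional']
--
--
-- def _kind(line):
--     ll = line.lower().strip()
--     if any(m in ll for m in _STARTS):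
--         return 1
--     if '## what drives me' in ll or '## additional' in ll:
--         return 2
--     return 0
--
--
-- def _count_bullets(text: str) -> int:
--     segments = []          # (tag of nearest preceding marker, lines of the segment)
--     tag, seg = 0, []
--     for line in text.split('\n'):
--         k = _kind(line)
--         if k:
--             segments.append((tag, seg))
--             tag, seg = k, []
--         else:
--             seg.append(line)
--     segments.append((tag, seg))
--     return sum(1 for t, s in segments if t == 1
--                  for line in s if line.strip().startswith('- '))
-- ===== Notes on version B (the rewrite author's own statement) =====
-- stated objective: alternative
-- what changed: A's single-pass boolean state machine is replaced by an explicit two-phase decomposition: the lines are partitioned into marker-delimited segments tagged by their opening marker, and bullets are then counted over the segments tagged as counting.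
import Mathlib
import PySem

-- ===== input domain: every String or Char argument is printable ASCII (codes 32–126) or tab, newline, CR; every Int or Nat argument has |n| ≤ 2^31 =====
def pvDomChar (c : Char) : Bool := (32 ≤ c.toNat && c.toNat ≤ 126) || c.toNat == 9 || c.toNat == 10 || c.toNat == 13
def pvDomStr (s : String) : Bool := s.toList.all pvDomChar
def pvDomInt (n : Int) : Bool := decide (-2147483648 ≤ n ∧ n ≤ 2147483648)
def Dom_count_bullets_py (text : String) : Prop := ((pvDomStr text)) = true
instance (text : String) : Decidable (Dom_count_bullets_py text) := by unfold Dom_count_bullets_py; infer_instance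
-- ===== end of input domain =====

-- B replaces A's single-pass boolean state machine by an explicit marker-delimited
-- segmentation of the lines followed by a bullet count over the counting segments
-- (objective: alternative decomposition; same cost).

-- shared line-level predicates (both Pythons test literally these conditions)
def pvStartMarkers : List String :=
  ["## professional experience", "## research", "## projects", "## publications", "## research & professional"]

def pvLL (line : List Char) : List Char := PySem.Chars.strip (PySem.Chars.lower line)

def pvIsStart (ll : List Char) : Bool := pvStartMarkers.any (fun m => PySem.Chars.isIn m.toList ll)

def pvIsStop (ll : List Char) : Bool :=
  PySem.Chars.isIn "## what drives me".toList ll || PySem.Chars.isIn "## additional".toList ll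

def pvIsBullet (line : List Char) : Bool :=
  PySem.Chars.startswith (PySem.Chars.strip line) "- ".toList

-- ===== PORT A =====
def pvAStep (st : Bool × Int) (line : List Char) : Bool × Int :=
  let line_lower := pvLL line
  if pvIsStart line_lower then (true, st.2)
  else if pvIsStop line_lower then (false, st.2)
  else if st.1 && pvIsBullet line then (st.1, st.2 + 1)
  else st

def count_bullets_py (text : String) : Int :=
  ((PySem.Chars.splitOn text.toList "\n".toList).foldl pvAStep (false, 0)).2

-- ===== PORT B =====
def pvKind (line : List Char) : Nat :=
  let ll := pvLL line
  if pvIsStart ll then 1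
  else if pvIsStop ll then 2
  else 0

def pvBStep (st : Nat × List (List Char) × List (Nat × List (List Char))) (line : List Char) :
    Nat × List (List Char) × List (Nat × List (List Char)) :=
  let k := pvKind line
  if k ≠ 0 then (k, [], st.2.2 ++ [(st.1, st.2.1)])
  else (st.1, st.2.1 ++ [line], st.2.2)

def pvSegSum (segs : List (Nat × List (List Char))) : Int :=
  ((segs.filter (fun p => p.1 == 1)).map (fun p => ((p.2.countP pvIsBullet : Nat) : Int))).sum

def count_bullets_py_alt (text : String) : Int :=
  let st := (PySem.Chars.splitOn text.toList "\n".toList).foldl pvBStep (0, [], [])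
  pvSegSum (st.2.2 ++ [(st.1, st.2.1)])

-- ===== PRECONDITION & SPEC =====
def Spec_count_bullets_py (text : String) (out : Int) : Prop := out = count_bullets_py_alt text
instance (text : String) (out : Int) : Decidable (Spec_count_bullets_py text out) := by unfold Spec_count_bullets_py; infer_instance

-- ===== CLAIM (what is proved, stated in full; the proofs are below) =====
def Claim_equal_count_bullets_py : Prop := ∀ (text : String), Dom_count_bullets_py text → Spec_count_bullets_py text (count_bullets_py text)

-- ===== LEMMAS AND PROOFS =====

-- pvAStep expressed through pvKind (the two ports test the same conditions)
theorem pvAStep_kind1 (st : Bool × Int) (line : List Char) (h : pvKind line = 1) :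
    pvAStep st line = (true, st.2) := by
  simp only [pvKind] at h
  simp only [pvAStep]
  by_cases h1 : pvIsStart (pvLL line) <;> by_cases h2 : pvIsStop (pvLL line) <;>
    simp [h1, h2] at h ⊢

theorem pvAStep_kind2 (st : Bool × Int) (line : List Char) (h : pvKind line = 2) :
    pvAStep st line = (false, st.2) := by
  simp only [pvKind] at h
  simp only [pvAStep]
  by_cases h1 : pvIsStart (pvLL line) <;> by_cases h2 : pvIsStop (pvLL line) <;>
    simp [h1, h2] at h ⊢

theorem pvAStep_kind0 (st : Bool × Int) (line : List Char) (h : pvKind line = 0) :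
    pvAStep st line = (st.1, if st.1 && pvIsBullet line then st.2 + 1 else st.2) := by
  simp only [pvKind] at h
  by_cases h1 : pvIsStart (pvLL line)
  · simp [h1] at h
  · by_cases h2 : pvIsStop (pvLL line)
    · simp [h1, h2] at h
    · simp only [pvAStep, h1, h2, Bool.false_eq_true, if_false]
      by_cases hb : st.1 && pvIsBullet line <;> simp [hb]

theorem pvKind_lt3 (line : List Char) : pvKind line < 3 := by
  simp only [pvKind]
  by_cases h1 : pvIsStart (pvLL line) <;> by_cases h2 : pvIsStop (pvLL line) <;> simp [h1, h2]

theorem pvSegSum_append (a b : List (Nat × List (List Char))) :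
    pvSegSum (a ++ b) = pvSegSum a + pvSegSum b := by
  unfold pvSegSum; simp [List.filter_append]

theorem pvSegSum_single (tag : Nat) (seg : List (List Char)) :
    pvSegSum [(tag, seg)] = if tag = 1 then ((seg.countP pvIsBullet : Nat) : Int) else 0 := by
  by_cases h : tag = 1
  · simp [pvSegSum, h, List.filter]
  · have hb : (tag == 1) = false := by simp [h]
    simp [pvSegSum, h, List.filter, hb]

-- the A-fold's count component only shifts with the accumulator
theorem pvAfold_shift (lines : List (List Char)) (flag : Bool) (c : Int) :
    (lines.foldl pvAStep (flag, c)).2 = c + (lines.foldl pvAStep (flag, 0)).2 := by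
  induction lines generalizing flag c with
  | nil => simp
  | cons l ls ih =>
    rcases h : pvKind l with _ | k
    · rw [List.foldl_cons, List.foldl_cons, pvAStep_kind0 _ _ h, pvAStep_kind0 _ _ h]
      by_cases hb : flag && pvIsBullet l
      · simp only [hb, if_true]
        rw [ih flag (c + 1), ih flag (0 + 1)]; ring
      · simp only [hb]; exact ih flag c
    · rcases k with _ | k
      · rw [List.foldl_cons, List.foldl_cons, pvAStep_kind1 _ _ h, pvAStep_kind1 _ _ h]
        exact ih true c
      · rcases k with _ | k
        · rw [List.foldl_cons, List.foldl_cons, pvAStep_kind2 _ _ h, pvAStep_kind2 _ _ h]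
          exact ih false c
        · exact absurd h (by have := pvKind_lt3 l; omega)

-- main invariant: the segment decomposition computes the state machine's count
theorem pvMain (lines : List (List Char)) (tag : Nat) (seg : List (List Char))
    (segs : List (Nat × List (List Char))) :
    (let st := lines.foldl pvBStep (tag, seg, segs)
     pvSegSum (st.2.2 ++ [(st.1, st.2.1)]))
    = pvSegSum segs + pvSegSum [(tag, seg)] + (lines.foldl pvAStep ((tag == 1), 0)).2 := by
  induction lines generalizing tag seg segs with
  | nil => simp [pvSegSum_append]
  | cons l ls ih =>
    rcases h : pvKind l with _ | k
    · -- plain line: appended to the current segment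
      have hB : pvBStep (tag, seg, segs) l = (tag, seg ++ [l], segs) := by
        unfold pvBStep; simp [h]
      simp only [List.foldl_cons, hB, pvAStep_kind0 _ _ h]
      rw [ih tag (seg ++ [l]) segs]
      rw [pvSegSum_single, pvSegSum_single]
      by_cases ht : tag = 1
      · subst ht
        have h1 : ((1 : Nat) == 1) = true := by decide
        simp only [if_true, h1, Bool.true_and]
        by_cases hb : pvIsBullet l
        · simp only [hb, if_true]
          rw [pvAfold_shift ls true (0 + 1)]
          simp [List.countP_append, hb]
          ring
        · simp only [hb]
          simp [List.countP_append, hb]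
      · have h1 : (tag == 1) = false := by simp [ht]
        simp [ht, h1]
    · rcases k with _ | k
      · -- start marker
        have hB : pvBStep (tag, seg, segs) l = (1, [], segs ++ [(tag, seg)]) := by
          unfold pvBStep; simp [h]
        simp only [List.foldl_cons, hB, pvAStep_kind1 _ _ h]
        rw [ih 1 [] (segs ++ [(tag, seg)]), pvSegSum_append]
        simp [pvSegSum_single]
      · rcases k with _ | k
        · -- stop marker
          have hB : pvBStep (tag, seg, segs) l = (2, [], segs ++ [(tag, seg)]) := by
            unfold pvBStep; simp [h]
          simp only [List.foldl_cons, hB, pvAStep_kind2 _ _ h]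
          rw [ih 2 [] (segs ++ [(tag, seg)]), pvSegSum_append]
          simp [pvSegSum_single]
        · exact absurd h (by have := pvKind_lt3 l; omega)

-- ===== VERDICT (by name: the statement is the Claim_ definition above) =====
theorem count_bullets_py_spec : Claim_equal_count_bullets_py := by
  intro text _
  unfold Spec_count_bullets_py count_bullets_py count_bullets_py_alt
  have := pvMain (PySem.Chars.splitOn text.toList "\n".toList) 0 [] []
  simp only at this
  rw [this]
  simp [pvSegSum]
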